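-- pv_equiv track=rewrite | github.com/HaLT3103/Python | tách số và sắp xếp.py | split_and_sort_3
-- ===== SOURCE A (Python) =====
-- def split_and_sort_3(strings):
--     numbers = []
--     for s in strings:
--         num = ""
--         for c in s:
--             if c.isdigit (): # nếu là số thì nối vào num
--                 num += c
--             elif num: # nếu không phải số và num không rỗng thì thêm vào numbers
--                 numbers.append (num)
--                 num = ""
--         if num: # nếu num không rỗng sau khi duyệt hết xâu thì thêm vào numbers
--             numbers.append (num)
--     numbers = sorted (map (int, numbers)) # chuyển đổi sang số nguyên và sắp xếp
--     return numbers
-- ===== SOURCE B (Python) =====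
-- def split_and_sort_3(strings):
--     # index-based run extraction instead of the accumulate-and-flush state machine
--     numbers = []
--     for s in strings:
--         i, n = 0, len(s)
--         while i < n:
--             if s[i].isdigit():
--                 j = i
--                 while j < n and s[j].isdigit():
--                     j += 1
--                 numbers.append(int(s[i:j]))
--                 i = j
--             else:
--                 i += 1
--     return sorted(numbers)
-- ===== Notes on version B (the rewrite author's own statement) =====
-- stated objective: alternative
-- what changed: Replaces A's per-character accumulate-and-flush buffer state machine with index-based extraction of maximal digit runs (inner while scanning each run, converting it to int immediately), keeping the final sort.
import Mathlib
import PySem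

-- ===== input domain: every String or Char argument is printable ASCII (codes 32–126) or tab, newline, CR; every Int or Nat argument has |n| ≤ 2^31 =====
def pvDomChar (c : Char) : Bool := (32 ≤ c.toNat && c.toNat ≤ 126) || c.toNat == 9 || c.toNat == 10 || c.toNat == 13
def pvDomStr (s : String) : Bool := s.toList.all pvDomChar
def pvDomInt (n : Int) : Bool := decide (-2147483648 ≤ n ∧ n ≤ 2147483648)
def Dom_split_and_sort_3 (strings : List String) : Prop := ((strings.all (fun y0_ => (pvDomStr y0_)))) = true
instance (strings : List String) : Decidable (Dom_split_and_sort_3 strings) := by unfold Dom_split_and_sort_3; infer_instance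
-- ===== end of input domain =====

-- B replaces A's accumulate-and-flush character state machine by index-based extraction
-- of maximal digit runs (objective: alternative decomposition, same cost).

-- int(tok): every token is a nonempty run of ASCII digits, so ofChars? always returns
-- some and the getD default is unreachable (shared by both ports, both call int()).
def pvToInt (cs : List Char) : Int := (PySem.Int.ofChars? cs).getD 0

-- ===== PORT A =====
def split_and_sort_3 (strings : List String) : List Int :=
  let numbers := strings.foldl (fun numbers s =>
    let p := s.toList.foldl (fun (p : List (List Char) × List Char) c =>
        if PySem.Chars.isdigit c then (p.1, p.2 ++ [c])
        else if p.2 ≠ [] then (p.1 ++ [p.2], ([] : List Char))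
        else p) (numbers, ([] : List Char))
    if p.2 ≠ [] then p.1 ++ [p.2] else p.1) []
  PySem.List.sorted (numbers.map pvToInt) (fun x => x) false

-- ===== PORT B =====
-- the inner while-loops of Source B: skip a non-digit, or take the maximal digit run
-- starting at i (the inner `while j < n and s[j].isdigit()` scan) and continue after it
def pvRunTokens (cs : List Char) : List Int :=
  match cs with
  | [] => []
  | c :: rest =>
    if PySem.Chars.isdigit c then
      pvToInt (c :: rest.takeWhile PySem.Chars.isdigit) ::
        pvRunTokens (rest.dropWhile PySem.Chars.isdigit)
    else pvRunTokens rest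
termination_by cs.length
decreasing_by
  · exact Nat.lt_succ_of_le (List.length_dropWhile_le _ _)
  · exact Nat.lt_succ_iff.mpr (Nat.le_refl _)

def split_and_sort_3_alt (strings : List String) : List Int :=
  PySem.List.sorted (strings.flatMap (fun s => pvRunTokens s.toList)) (fun x => x) false

-- ===== PRECONDITION & SPEC =====
def Spec_split_and_sort_3 (strings : List String) (out : List Int) : Prop := out = split_and_sort_3_alt strings
instance (strings : List String) (out : List Int) : Decidable (Spec_split_and_sort_3 strings out) := by unfold Spec_split_and_sort_3; infer_instance

-- ===== CLAIM (what is proved, stated in full; the proofs are below) =====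
def Claim_equal_split_and_sort_3 : Prop := ∀ (strings : List String), Dom_split_and_sort_3 strings → Spec_split_and_sort_3 strings (split_and_sort_3 strings)

-- ===== LEMMAS AND PROOFS =====

-- proof-side characterisation of A's inner state machine: tokens still to be emitted
-- from the remaining characters cs given the pending digit buffer num
def tokA (cs : List Char) (num : List Char) : List (List Char) :=
  match cs with
  | [] => if num ≠ [] then [num] else []
  | c :: cs =>
    if PySem.Chars.isdigit c then tokA cs (num ++ [c])
    else if num ≠ [] then num :: tokA cs []
    else tokA cs []

theorem tokA_fold (cs : List Char) : ∀ (acc : List (List Char)) (num : List Char),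
    (let p := cs.foldl (fun (p : List (List Char) × List Char) c =>
        if PySem.Chars.isdigit c then (p.1, p.2 ++ [c])
        else if p.2 ≠ [] then (p.1 ++ [p.2], ([] : List Char))
        else p) (acc, num)
     if p.2 ≠ [] then p.1 ++ [p.2] else p.1) = acc ++ tokA cs num := by
  induction cs with
  | nil => intro acc num; simp only [List.foldl_nil, tokA]; split_ifs <;> simp
  | cons c cs ih =>
    intro acc num
    simp only [List.foldl_cons, tokA]
    by_cases hd : PySem.Chars.isdigit c
    · simp only [hd, if_true]; exact ih acc (num ++ [c])
    · by_cases hn : num = []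
      · subst hn; simpa [hd] using ih acc []
      · simpa [hd, hn] using ih (acc ++ [num]) []

theorem tokA_pending (cs : List Char) : ∀ (num : List Char), num ≠ [] →
    tokA cs num = (num ++ cs.takeWhile PySem.Chars.isdigit) ::
      tokA (cs.dropWhile PySem.Chars.isdigit) [] := by
  induction cs with
  | nil => intro num hn; simp [tokA, hn]
  | cons c cs ih =>
    intro num hn
    by_cases hd : PySem.Chars.isdigit c
    · simp only [tokA, hd, if_true, List.takeWhile_cons, List.dropWhile_cons]
      rw [ih (num ++ [c]) (by simp)]
      simp
    · simp [tokA, hd, hn]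

theorem tokA_runTokens : ∀ (cs : List Char), (tokA cs []).map pvToInt = pvRunTokens cs := by
  intro cs
  induction cs using pvRunTokens.induct with
  | case1 => simp [tokA, pvRunTokens]
  | case2 c rest hd ih =>
    simp only [tokA, hd, if_true, List.nil_append]
    rw [tokA_pending rest [c] (by simp)]
    simp only [List.map_cons, ih, pvRunTokens, hd, if_true]
    rfl
  | case3 c rest hd ih =>
    simp [tokA, pvRunTokens, hd, ih]

theorem numbers_flatMap (ss : List String) : ∀ (acc : List (List Char)),
    ss.foldl (fun numbers s =>
      let p := s.toList.foldl (fun (p : List (List Char) × List Char) c =>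
          if PySem.Chars.isdigit c then (p.1, p.2 ++ [c])
          else if p.2 ≠ [] then (p.1 ++ [p.2], ([] : List Char))
          else p) (numbers, ([] : List Char))
      if p.2 ≠ [] then p.1 ++ [p.2] else p.1) acc
    = acc ++ ss.flatMap (fun s => tokA s.toList []) := by
  induction ss with
  | nil => simp
  | cons s ss ih =>
    intro acc
    simp only [List.foldl_cons, List.flatMap_cons]
    rw [show (let p := s.toList.foldl _ (acc, ([] : List Char));
         if p.2 ≠ [] then p.1 ++ [p.2] else p.1) = acc ++ tokA s.toList [] from tokA_fold s.toList acc [],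
        ih, List.append_assoc]

-- ===== VERDICT (by name: the statement is the Claim_ definition above) =====
theorem split_and_sort_3_spec : Claim_equal_split_and_sort_3 := by
  intro strings _
  unfold Spec_split_and_sort_3 split_and_sort_3 split_and_sort_3_alt
  rw [numbers_flatMap strings [], List.nil_append]
  dsimp only
  rw [List.map_flatMap]
  simp only [tokA_runTokens]
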